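-- pv_equiv track=rewrite | github.com/Aadityagoel15/OrionTest-Agentic-AI-driven-Automation | agents/feature_to_stepdef_agent.py | _canonicalize_params
-- ===== SOURCE A (Python) =====
-- def _canonicalize_params(step: str) -> str:
--     """
--     Convert placeholders to proper parameter names with quotes for regex pattern.
--     Matches base implementations in web_steps.py and common_steps.py
--     """
--     if "{}" not in step:
--         return step
--
--     # Map step patterns to parameter names (with quotes for regex)
--     step_lower = step.lower()
--
--     if "navigates to" in step_lower:
--         return step.replace("{}", '"{url}"', 1)
--     elif ("enters" in step_lower and "into" in step_lower and ("field" in step_lower or "input" in step_lower)) or ("enters" in step_lower and "input with label" in step_lower):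
--         # Two parameters: value and field (both quoted)
--         result = step.replace("{}", '"{value}"', 1)
--         result = result.replace("{}", '"{field}"', 1)
--         return result
--     elif "clicks the" in step_lower and "button" in step_lower and "for the item" in step_lower:
--         # Two parameters: element (button name) and item
--         result = step.replace("{}", '"{element}"', 1)
--         result = result.replace("{}", '"{item}"', 1)
--         return result
--     elif "clicks the" in step_lower and "button" in step_lower:
--         return step.replace("{}", '"{element}"', 1)
--     elif "should see text" in step_lower:
--         return step.replace("{}", '"{text}"', 1)
--     elif "should be on the home page" in step_lower:
--         return step  # No params
--     elif "action should" in step_lower: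
--         return step  # No params
--     else:
--         # Fallback: use generic names with quotes
--         count = step.count("{}")
--         if count == 1:
--             return step.replace("{}", '"{value}"')
--         else:
--             result = step
--             param_names = ['value', 'field', 'element', 'text', 'item']
--             for i in range(count):
--                 param_name = param_names[i] if i < len(param_names) else f'value{i+1}'
--                 result = result.replace("{}", f'"{param_name}"', 1)
--             return result
-- ===== SOURCE B (Python) =====
-- # B: two-stage rewrite -- first compute the full list of replacement tokens for the
-- # step, then substitute them in ONE left-to-right scan over the string (A instead
-- # re-scans the string from the start with a fresh .replace(..., 1) per parameter).
--
-- def _params_for(low, n):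
--     """Replacement tokens (already quoted) for a step; low = lowercased step,
--     n = number of '{}' placeholders (used only by the generic fallback)."""
--     if "navigates to" in low:
--         return ['"{url}"']
--     if "enters" in low and (("into" in low and ("field" in low or "input" in low))
--                             or "input with label" in low):
--         return ['"{value}"', '"{field}"']
--     if "clicks the" in low and "button" in low:
--         return ['"{element}"', '"{item}"'] if "for the item" in low else ['"{element}"']
--     if "should see text" in low:
--         return ['"{text}"']
--     if "should be on the home page" in low or "action should" in low:
--         return []
--     # generic fallback
--     if n == 1:
--         return ['"{value}"']
--     return (['"value"', '"field"', '"element"', '"text"', '"item"'][:n]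
--             + ['"value%d"' % (i + 1) for i in range(5, n)])
--
--
-- def _canonicalize_params(step: str) -> str:
--     tokens = _params_for(step.lower(), step.count("{}"))
--     out = []
--     i = 0
--     while i < len(step):
--         if not tokens:
--             out.append(step[i:])
--             break
--         if step.startswith("{}", i):
--             out.append(tokens.pop(0))
--             i += 2
--         else:
--             out.append(step[i])
--             i += 1
--     return "".join(out)
-- ===== Notes on version B (the rewrite author's own statement) =====
-- stated objective: alternative
-- what changed: B first computes the complete list of replacement tokens for the step (pattern rules plus the generic fallback name list), then substitutes all of them in a single left-to-right scan of the string that consumes one token per placeholder and emits the rest verbatim, instead of A's per-parameter replace-first-occurrence calls that each re-scan the string from the start.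
import Mathlib
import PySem

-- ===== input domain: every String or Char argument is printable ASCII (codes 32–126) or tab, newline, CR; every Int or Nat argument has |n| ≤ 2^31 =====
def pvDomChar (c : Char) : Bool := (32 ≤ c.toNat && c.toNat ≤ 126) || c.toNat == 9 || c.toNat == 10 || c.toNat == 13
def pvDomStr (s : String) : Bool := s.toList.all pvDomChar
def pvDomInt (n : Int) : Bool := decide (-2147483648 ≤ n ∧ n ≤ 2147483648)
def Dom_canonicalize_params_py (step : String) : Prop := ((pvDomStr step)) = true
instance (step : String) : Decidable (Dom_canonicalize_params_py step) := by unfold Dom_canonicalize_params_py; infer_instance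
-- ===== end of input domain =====

-- B computes the full replacement-token list first and then substitutes all of them in
-- ONE left-to-right scan of the string, where A re-scans with one replace(...,1) per token.

-- ===== PORT A =====
-- Python's s.replace(old, new, 1). Hand-ported (PySem has only the unlimited replace);
-- exact for nonempty old — A only calls it with old = "{}".
def chReplace1 : List Char → List Char → List Char → List Char
  | [], _, _ => []
  | c :: t, old, new =>
      if old.isPrefixOf (c :: t) then new ++ (c :: t).drop old.length
      else c :: chReplace1 t old new

def pyReplace1 (s old new : String) : String :=
  String.ofList (chReplace1 s.toList old.toList new.toList)

def canonicalize_params_py (step : String) : String :=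
  if !PySem.Str.isIn "{}" step then step
  else
    let step_lower := PySem.Str.lower step
    if PySem.Str.isIn "navigates to" step_lower then
      pyReplace1 step "{}" "\"{url}\""
    else if (PySem.Str.isIn "enters" step_lower && PySem.Str.isIn "into" step_lower &&
              (PySem.Str.isIn "field" step_lower || PySem.Str.isIn "input" step_lower)) ||
            (PySem.Str.isIn "enters" step_lower && PySem.Str.isIn "input with label" step_lower) then
      let result := pyReplace1 step "{}" "\"{value}\""
      let result := pyReplace1 result "{}" "\"{field}\""
      result
    else if PySem.Str.isIn "clicks the" step_lower && PySem.Str.isIn "button" step_lower &&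
            PySem.Str.isIn "for the item" step_lower then
      let result := pyReplace1 step "{}" "\"{element}\""
      let result := pyReplace1 result "{}" "\"{item}\""
      result
    else if PySem.Str.isIn "clicks the" step_lower && PySem.Str.isIn "button" step_lower then
      pyReplace1 step "{}" "\"{element}\""
    else if PySem.Str.isIn "should see text" step_lower then
      pyReplace1 step "{}" "\"{text}\""
    else if PySem.Str.isIn "should be on the home page" step_lower then
      step
    else if PySem.Str.isIn "action should" step_lower then
      step
    else
      let count := PySem.Str.count step "{}"
      if count = 1 then
        PySem.Str.replace step "{}" "\"{value}\""
      else
        -- param_names[i] is safe in Python (guarded by i < len); .getD "" is unreachable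
        (PySem.List.pyRange 0 (count : Int) 1).foldl
          (fun result i =>
            let param_name :=
              if i < 5 then
                (PySem.List.pyGet? ["value", "field", "element", "text", "item"] i).getD ""
              else "value" ++ PySem.Int.toStr (i + 1)
            pyReplace1 result "{}" ("\"" ++ param_name ++ "\"")) step

-- ===== PORT B =====
-- Source B's _params_for: the replacement tokens for a step (low = lowercased step, n = count of "{}")
def paramsFor (low : String) (n : Nat) : List String :=
  if PySem.Str.isIn "navigates to" low then ["\"{url}\""]
  else if PySem.Str.isIn "enters" low &&
      ((PySem.Str.isIn "into" low && (PySem.Str.isIn "field" low || PySem.Str.isIn "input" low)) ||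
        PySem.Str.isIn "input with label" low) then ["\"{value}\"", "\"{field}\""]
  else if PySem.Str.isIn "clicks the" low && PySem.Str.isIn "button" low then
    if PySem.Str.isIn "for the item" low then ["\"{element}\"", "\"{item}\""] else ["\"{element}\""]
  else if PySem.Str.isIn "should see text" low then ["\"{text}\""]
  else if PySem.Str.isIn "should be on the home page" low || PySem.Str.isIn "action should" low then []
  else if n = 1 then ["\"{value}\""]
  else (List.take n ["\"value\"", "\"field\"", "\"element\"", "\"text\"", "\"item\""]) ++
    (PySem.List.pyRange 5 (n : Int) 1).map (fun i => "\"value" ++ PySem.Int.toStr (i + 1) ++ "\"")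

-- Source B's single while-loop: scan the string once; each "{}" (= '{' followed by '}',
-- exactly step.startswith("{}", i)) takes the next token; when tokens run out the rest
-- of the string is emitted verbatim
def substPass : List Char → List String → List Char
  | [], _ => []
  | s, [] => s
  | [c], _ => [c]
  | c :: d :: t, tok :: rest =>
      if c = '{' ∧ d = '}' then tok.toList ++ substPass t rest
      else c :: substPass (d :: t) (tok :: rest)

def canonicalize_params_py_alt (step : String) : String :=
  String.ofList (substPass step.toList
    (paramsFor (PySem.Str.lower step) (PySem.Str.count step "{}")))

-- ===== PRECONDITION & SPEC =====
def Spec_canonicalize_params_py (step : String) (out : String) : Prop := out = canonicalize_params_py_alt step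
instance (step : String) (out : String) : Decidable (Spec_canonicalize_params_py step out) := by unfold Spec_canonicalize_params_py; infer_instance

-- ===== CLAIM (what is proved, stated in full; the proofs are below) =====
def Claim_equal_canonicalize_params_py : Prop := ∀ (step : String), Dom_canonicalize_params_py step → Spec_canonicalize_params_py step (canonicalize_params_py step)

-- ===== LEMMAS AND PROOFS =====

theorem pvPatToList : ("{}" : String).toList = ['{', '}'] := by rfl

-- tokens are "safe": nonempty, never start with '}', never end with '{', never contain "{}"
def pvGood (tok : String) : Prop :=
  tok.toList ≠ [] ∧ tok.toList.head? ≠ some '}' ∧ tok.toList.getLast? ≠ some '{' ∧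
    PySem.Chars.isIn ['{', '}'] tok.toList = false

-- Python-scan count of "{}" occurrences, and replace-all, as clean recursions
def cntPat : List Char → Nat
  | [] => 0
  | [_] => 0
  | c :: d :: t => if c = '{' ∧ d = '}' then 1 + cntPat t else cntPat (d :: t)

def repAllPat (new : List Char) : List Char → List Char
  | [] => []
  | [c] => [c]
  | c :: d :: t => if c = '{' ∧ d = '}' then new ++ repAllPat new t
                   else c :: repAllPat new (d :: t)

-- A's generic token at index i
def tokA (i : Int) : String :=
  "\"" ++ (if i < 5 then (PySem.List.pyGet? ["value", "field", "element", "text", "item"] i).getD ""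
           else "value" ++ PySem.Int.toStr (i + 1)) ++ "\""

theorem pfx2 (c d : Char) (t : List Char) :
    List.isPrefixOf ['{', '}'] (c :: d :: t) = true ↔ (c = '{' ∧ d = '}') := by
  constructor
  · intro h
    rw [List.isPrefixOf_iff_prefix] at h
    obtain ⟨u, hu⟩ := h
    injection hu with h1 h2
    injection h2 with h3 _
    exact ⟨h1.symm, h3.symm⟩
  · rintro ⟨rfl, rfl⟩
    rfl

theorem pfx1 (c : Char) : List.isPrefixOf ['{', '}'] [c] = false := by
  simp [List.isPrefixOf]

theorem prefixPat_iff (c : Char) (t : List Char) :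
    List.isPrefixOf ['{', '}'] (c :: t) = true ↔ c = '{' ∧ t.head? = some '}' := by
  cases t with
  | nil => simp [List.isPrefixOf]
  | cons d u => rw [pfx2]; simp

theorem chReplace1_of_not_infix (s old new : List Char) (h : ¬ old <:+: s) :
    chReplace1 s old new = s := by
  induction s with
  | nil => rfl
  | cons c t ih =>
      rw [chReplace1]
      rw [if_neg (by
        intro hp
        exact h ((List.isPrefixOf_iff_prefix.mp hp).isInfix))]
      rw [ih (fun hi => h (hi.trans (List.suffix_cons c t).isInfix))]

theorem foldl_chReplace1_nil (ns : List String) :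
    ns.foldl (fun out tok => chReplace1 out ['{', '}'] tok.toList) [] = [] := by
  induction ns with
  | nil => rfl
  | cons tok rest ih => simpa [chReplace1] using ih

theorem foldl_chReplace1_noocc (ns : List String) (s : List Char)
    (h : ¬ ['{', '}'] <:+: s) :
    ns.foldl (fun out tok => chReplace1 out ['{', '}'] tok.toList) s = s := by
  induction ns with
  | nil => rfl
  | cons tok rest ih => simp only [List.foldl_cons, chReplace1_of_not_infix s _ _ h, ih]

theorem substPass_nilTok (s : List Char) : substPass s [] = s := by
  cases s with
  | nil => rfl
  | cons c t => cases t <;> rfl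

theorem substPass_noocc (s : List Char) (ns : List String) (h : ¬ ['{', '}'] <:+: s) :
    substPass s ns = s := by
  induction s, ns using substPass.induct with
  | case1 => rfl
  | case2 => exact substPass_nilTok _
  | case3 c ns hne =>
      cases ns with
      | nil => rfl
      | cons tok rest => rfl
  | case4 c d t tok rest hg ih =>
      exact absurd ⟨[], t, by simp [hg.1, hg.2]⟩ h
  | case5 c d t tok rest hg ih =>
      simp only [substPass, if_neg hg]
      rw [ih (fun hi => h (hi.trans (List.suffix_cons c (d :: t)).isInfix))]

theorem chReplace1_append (a b nm : List Char)
    (h1 : ¬ ['{', '}'] <:+: a) (h2 : a.getLast? ≠ some '{') :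
    chReplace1 (a ++ b) ['{', '}'] nm = a ++ chReplace1 b ['{', '}'] nm := by
  induction a with
  | nil => rfl
  | cons c t ih =>
      rw [List.cons_append, chReplace1]
      rw [if_neg (by
        intro hp
        obtain ⟨hc, hh⟩ := (prefixPat_iff c (t ++ b)).mp hp
        cases t with
        | nil => exact h2 (by simp [hc])
        | cons d u =>
            simp only [List.cons_append, List.head?_cons, Option.some_inj] at hh
            exact h1 ⟨[], u, by simp [hc, hh]⟩)]
      rw [ih (fun hi => h1 (hi.trans (List.suffix_cons c t).isInfix))
          (by
            cases t with
            | nil => simp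
            | cons d u => simpa using h2)]
      rfl

theorem foldl_chReplace1_append (ns : List String) (a : List Char)
    (h1 : ¬ ['{', '}'] <:+: a) (h2 : a.getLast? ≠ some '{') :
    ∀ b : List Char,
      ns.foldl (fun out tok => chReplace1 out ['{', '}'] tok.toList) (a ++ b) =
        a ++ ns.foldl (fun out tok => chReplace1 out ['{', '}'] tok.toList) b := by
  induction ns with
  | nil => intro b; rfl
  | cons tok rest ih =>
      intro b
      simp only [List.foldl_cons]
      rw [chReplace1_append a b tok.toList h1 h2, ih (chReplace1 b ['{', '}'] tok.toList)]

theorem head_chReplace1 (x nm : List Char) (h1 : nm ≠ []) (h2 : nm.head? ≠ some '}')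
    (h3 : x.head? ≠ some '}') : (chReplace1 x ['{', '}'] nm).head? ≠ some '}' := by
  cases x with
  | nil => simp [chReplace1]
  | cons d u =>
      rw [chReplace1]
      split
      · cases nm with
        | nil => exact absurd rfl h1
        | cons e v => simpa using h2
      · simpa using h3

theorem chReplace1_cons (c : Char) (x nm : List Char)
    (hp : List.isPrefixOf ['{', '}'] (c :: x) = false) :
    chReplace1 (c :: x) ['{', '}'] nm = c :: chReplace1 x ['{', '}'] nm := by
  rw [chReplace1, if_neg (by simp [hp])]

theorem prefix_chReplace1 (c : Char) (x nm : List Char)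
    (hp : List.isPrefixOf ['{', '}'] (c :: x) = false)
    (h1 : nm ≠ []) (h2 : nm.head? ≠ some '}') :
    List.isPrefixOf ['{', '}'] (c :: chReplace1 x ['{', '}'] nm) = false := by
  rw [Bool.eq_false_iff]
  intro hpre
  obtain ⟨hc, hh⟩ := (prefixPat_iff _ _).mp hpre
  have hx : x.head? ≠ some '}' := by
    intro hh2
    rw [(prefixPat_iff c x).mpr ⟨hc, hh2⟩] at hp
    cases hp
  exact head_chReplace1 x nm h1 h2 hx hh

theorem foldl_chReplace1_cons :
    ∀ (ns : List String), (∀ tok ∈ ns, pvGood tok) →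
    ∀ (c : Char) (x : List Char), List.isPrefixOf ['{', '}'] (c :: x) = false →
      ns.foldl (fun out tok => chReplace1 out ['{', '}'] tok.toList) (c :: x) =
        c :: ns.foldl (fun out tok => chReplace1 out ['{', '}'] tok.toList) x := by
  intro ns
  induction ns with
  | nil => intro _ c x _; rfl
  | cons tok rest ih =>
      intro g c x hp
      obtain ⟨g1, g2, _, _⟩ := g tok (List.mem_cons_self ..)
      simp only [List.foldl_cons]
      rw [chReplace1_cons c x tok.toList hp]
      exact ih (fun t ht => g t (List.mem_cons_of_mem _ ht)) c _
        (prefix_chReplace1 c x tok.toList hp g1 g2)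

-- the central lemma: A's chain of first-occurrence replacements = B's single pass
theorem foldl_chReplace1_eq_substPass :
    ∀ (s : List Char) (ns : List String), (∀ tok ∈ ns, pvGood tok) →
      ns.foldl (fun out tok => chReplace1 out ['{', '}'] tok.toList) s = substPass s ns := by
  intro s ns
  induction s, ns using substPass.induct with
  | case1 ns => intro _; exact foldl_chReplace1_nil ns
  | case2 s => intro _; rw [substPass_nilTok]; rfl
  | case3 c ns hne =>
      intro _
      have hs : substPass [c] ns = [c] := by
        cases ns with
        | nil => rfl
        | cons tok rest => rfl
      rw [hs]
      exact foldl_chReplace1_noocc ns [c] (by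
        intro hi
        have := hi.length_le
        simp at this)
  | case4 c d t tok rest hg ih =>
      intro g
      obtain ⟨g1, g2, g3, g4⟩ := g tok (List.mem_cons_self ..)
      have grest : ∀ x ∈ rest, pvGood x := fun x hx => g x (List.mem_cons_of_mem _ hx)
      simp only [List.foldl_cons]
      rw [chReplace1, if_pos (by exact (pfx2 c d t).mpr hg)]
      have hdrop : (c :: d :: t).drop (['{', '}'] : List Char).length = t := by simp
      rw [hdrop,
          foldl_chReplace1_append rest tok.toList
            (by rwa [PySem.Chars.isIn_eq_false_iff] at g4) g3 t,
          ih grest, substPass, if_pos hg]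
  | case5 c d t tok rest hg ih =>
      intro g
      obtain ⟨g1, g2, _, _⟩ := g tok (List.mem_cons_self ..)
      have grest : ∀ x ∈ rest, pvGood x := fun x hx => g x (List.mem_cons_of_mem _ hx)
      have hp : List.isPrefixOf ['{', '}'] (c :: d :: t) = false := by
        rw [Bool.eq_false_iff]
        intro hpre
        exact hg ((pfx2 c d t).mp hpre)
      simp only [List.foldl_cons]
      rw [chReplace1_cons c (d :: t) tok.toList hp,
          foldl_chReplace1_cons rest grest c _
            (prefix_chReplace1 c (d :: t) tok.toList hp g1 g2)]
      have := ih g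
      simp only [List.foldl_cons] at this
      rw [this, substPass, if_neg hg]

-- count.go / replace.go with enough fuel compute the clean recursions above
theorem countGo_nil (fuel acc : Nat) : PySem.Chars.count.go ['{', '}'] fuel [] acc = acc := by
  cases fuel <;> simp [PySem.Chars.count.go]

theorem countGo_eq_cntPat (fuel : Nat) : ∀ (s : List Char) (acc : Nat), s.length ≤ fuel →
    PySem.Chars.count.go ['{', '}'] fuel s acc = acc + cntPat s := by
  induction fuel with
  | zero =>
      intro s acc h
      rw [List.length_eq_zero_iff.mp (Nat.le_zero.mp h), countGo_nil]
      simp [cntPat]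
  | succ fuel ih =>
      intro s acc h
      match s with
      | [] =>
          rw [countGo_nil]
          simp [cntPat]
      | [c] =>
          rw [PySem.Chars.count.go, if_neg (by simp [pfx1]), countGo_nil]
          simp [cntPat]
      | c :: d :: t =>
          rw [PySem.Chars.count.go, cntPat]
          by_cases hg : c = '{' ∧ d = '}'
          · rw [if_pos (by simp [(pfx2 c d t).mpr hg]), if_pos hg]
            have hdrop : (c :: d :: t).drop (['{', '}'] : List Char).length = t := by simp
            rw [hdrop, ih t (acc + 1) (by simp at h ⊢; omega)]
            omega
          · rw [if_neg (by intro hpre; exact hg ((pfx2 c d t).mp hpre)), if_neg hg]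
            exact ih (d :: t) acc (by simp at h ⊢; omega)

theorem count_eq_cntPat (s : List Char) : PySem.Chars.count s ['{', '}'] = cntPat s := by
  rw [PySem.Chars.count, if_neg (by simp), countGo_eq_cntPat s.length s 0 le_rfl]
  omega

theorem replaceGo_nil (new acc : List Char) (fuel : Nat) :
    PySem.Chars.replace.go ['{', '}'] new fuel [] acc = acc.reverse := by
  cases fuel <;> simp [PySem.Chars.replace.go]

theorem replaceGo_eq_repAllPat (new : List Char) (fuel : Nat) :
    ∀ (s acc : List Char), s.length ≤ fuel →
    PySem.Chars.replace.go ['{', '}'] new fuel s acc = acc.reverse ++ repAllPat new s := by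
  induction fuel with
  | zero =>
      intro s acc h
      rw [List.length_eq_zero_iff.mp (Nat.le_zero.mp h), replaceGo_nil]
      simp [repAllPat]
  | succ fuel ih =>
      intro s acc h
      match s with
      | [] =>
          rw [replaceGo_nil]
          simp [repAllPat]
      | [c] =>
          rw [PySem.Chars.replace.go, if_neg (by simp [pfx1]), replaceGo_nil]
          simp [repAllPat]
      | c :: d :: t =>
          rw [PySem.Chars.replace.go, repAllPat]
          by_cases hg : c = '{' ∧ d = '}'
          · rw [if_pos (by simp [(pfx2 c d t).mpr hg]), if_pos hg]
            have hdrop : (c :: d :: t).drop (['{', '}'] : List Char).length = t := by simp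
            rw [hdrop, ih t (new.reverse ++ acc) (by simp at h ⊢; omega)]
            simp
          · rw [if_neg (by intro hpre; exact hg ((pfx2 c d t).mp hpre)), if_neg hg]
            rw [ih (d :: t) (c :: acc) (by simp at h ⊢; omega)]
            simp

theorem replace_eq_repAllPat (s new : List Char) :
    PySem.Chars.replace s ['{', '}'] new = repAllPat new s := by
  rw [PySem.Chars.replace, if_neg (by simp),
      replaceGo_eq_repAllPat new s.length s [] le_rfl]
  rfl

theorem repAllPat_cnt0 (new : List Char) :
    ∀ s : List Char, cntPat s = 0 → repAllPat new s = s := by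
  intro s
  induction s using cntPat.induct with
  | case1 => intro _; rfl
  | case2 c => intro _; rfl
  | case3 c d t hg ih =>
      intro h
      rw [cntPat, if_pos hg] at h
      omega
  | case4 c d t hg ih =>
      intro h
      rw [cntPat, if_neg hg] at h
      rw [repAllPat, if_neg hg, ih h]

theorem repAllPat_cnt1 (new : List Char) :
    ∀ s : List Char, cntPat s = 1 → repAllPat new s = chReplace1 s ['{', '}'] new := by
  intro s
  induction s using cntPat.induct with
  | case1 => intro h; rw [cntPat] at h; omega
  | case2 c => intro h; rw [cntPat] at h; omega
  | case3 c d t hg ih =>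
      intro h
      rw [cntPat, if_pos hg] at h
      rw [repAllPat, if_pos hg, chReplace1, if_pos (by simp [(pfx2 c d t).mpr hg])]
      have hdrop : (c :: d :: t).drop (['{', '}'] : List Char).length = t := by simp
      rw [hdrop, repAllPat_cnt0 new t (by omega)]
  | case4 c d t hg ih =>
      intro h
      rw [cntPat, if_neg hg] at h
      rw [repAllPat, if_neg hg,
          chReplace1_cons c (d :: t) new
            (by rw [Bool.eq_false_iff]; intro hpre; exact hg ((pfx2 c d t).mp hpre)),
          ih h]

-- the digits of str(i+1) never contain '{'
theorem digitChar_ne (n : Nat) : Nat.digitChar n ≠ '{' := by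
  rcases lt_or_ge n 16 with h16 | h16
  · interval_cases n <;> decide
  · have h : Nat.digitChar n = '*' := by
      rw [Nat.digitChar]
      rw [if_neg (by omega), if_neg (by omega), if_neg (by omega), if_neg (by omega),
          if_neg (by omega), if_neg (by omega), if_neg (by omega), if_neg (by omega),
          if_neg (by omega), if_neg (by omega), if_neg (by omega), if_neg (by omega),
          if_neg (by omega), if_neg (by omega), if_neg (by omega), if_neg (by omega)]
    rw [h]; decide

theorem toDigitsCore_no_brace (fuel : Nat) : ∀ (n : Nat) (l : List Char),
    '{' ∉ l → '{' ∉ Nat.toDigitsCore 10 fuel n l := by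
  induction fuel with
  | zero => intro n l h; simpa [Nat.toDigitsCore] using h
  | succ fuel ih =>
      intro n l h
      rw [Nat.toDigitsCore]
      split
      · intro hm
        rcases List.mem_cons.mp hm with hm | hm
        · exact digitChar_ne _ hm.symm
        · exact h hm
      · exact ih _ _ (by
          intro hm
          rcases List.mem_cons.mp hm with hm | hm
          · exact digitChar_ne _ hm.symm
          · exact h hm)

theorem toChars_no_brace (n : Int) : '{' ∉ PySem.Int.toChars n := by
  rw [PySem.Int.toChars]
  split
  · intro hm
    rcases List.mem_cons.mp hm with hm | hm
    · exact absurd hm.symm (by decide)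
    · exact toDigitsCore_no_brace _ _ _ (by simp) hm
  · exact toDigitsCore_no_brace _ _ _ (by simp)

theorem good_gen (i : Int) : pvGood ("\"value" ++ PySem.Int.toStr (i + 1) ++ "\"") := by
  have htl : ("\"value" ++ PySem.Int.toStr (i + 1) ++ "\"").toList =
      '"' :: 'v' :: 'a' :: 'l' :: 'u' :: 'e' :: (PySem.Int.toChars (i + 1) ++ ['"']) := by
    simp [PySem.Int.toStr]
  have hassoc : ('"' :: 'v' :: 'a' :: 'l' :: 'u' :: 'e' :: (PySem.Int.toChars (i + 1) ++ ['"'])) =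
      ('"' :: 'v' :: 'a' :: 'l' :: 'u' :: 'e' :: PySem.Int.toChars (i + 1)) ++ ['"'] := by
    simp
  refine ⟨by simp [htl], by simp [htl], ?_, ?_⟩
  · rw [htl, hassoc, List.getLast?_concat]
    decide
  · rw [PySem.Chars.isIn_eq_false_iff, htl]
    intro hinf
    have : '{' ∈ '"' :: 'v' :: 'a' :: 'l' :: 'u' :: 'e' :: (PySem.Int.toChars (i + 1) ++ ['"']) :=
      hinf.subset (by simp)
    simp only [List.mem_cons, List.mem_append] at this
    rcases this with h|h|h|h|h|h|h|h <;>
      first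
        | exact absurd h (by decide)
        | exact toChars_no_brace (i + 1) h

theorem tokA_ge5 (i : Int) (h : 5 ≤ i) :
    tokA i = "\"value" ++ PySem.Int.toStr (i + 1) ++ "\"" := by
  rw [tokA, if_neg (by omega)]
  rw [show ("\"" : String) ++ ("value" ++ PySem.Int.toStr (i + 1)) =
        ("\"" ++ "value") ++ PySem.Int.toStr (i + 1) from (String.append_assoc).symm,
      show (("\"" ++ "value") : String) = "\"value" from by decide]

theorem map_tokA_range (n : Nat) :
    (PySem.List.pyRange 0 (n : Int) 1).map tokA =
      (List.take n ["\"value\"", "\"field\"", "\"element\"", "\"text\"", "\"item\""]) ++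
        (PySem.List.pyRange 5 (n : Int) 1).map
          (fun i => "\"value" ++ PySem.Int.toStr (i + 1) ++ "\"") := by
  induction n with
  | zero =>
      rw [PySem.List.pyRange_one_eq_nil (by norm_num), PySem.List.pyRange_one_eq_nil (by norm_num)]
      rfl
  | succ n ih =>
      rw [show ((n + 1 : Nat) : Int) = (n : Int) + 1 by push_cast; ring]
      rw [PySem.List.pyRange_one_succ_right (by positivity), List.map_append, ih, List.map_singleton]
      by_cases hn : n < 5
      · rw [PySem.List.pyRange_one_eq_nil (by exact_mod_cast hn.le),
            PySem.List.pyRange_one_eq_nil (by exact_mod_cast Nat.succ_le_of_lt hn)]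
        simp only [List.map_nil, List.append_nil]
        interval_cases n <;> rfl
      · rw [Nat.not_lt] at hn
        rw [PySem.List.pyRange_one_succ_right (by exact_mod_cast hn), List.map_append,
            List.map_singleton]
        rw [List.take_of_length_le (by simpa using hn),
            List.take_of_length_le (by simp; omega)]
        rw [tokA_ge5 (n : Int) (by exact_mod_cast hn)]
        simp

-- lift the String-level generic foldl of A to the List Char level
theorem toList_foldl_pyReplace1 (L : List Int) : ∀ s : String,
    (L.foldl (fun r i => pyReplace1 r "{}" (tokA i)) s).toList =
      L.foldl (fun r i => chReplace1 r ['{', '}'] (tokA i).toList) s.toList := by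
  induction L with
  | nil => intro s; rfl
  | cons i rest ih =>
      intro s
      simp only [List.foldl_cons]
      rw [ih (pyReplace1 s "{}" (tokA i))]
      congr 1
      simp [pyReplace1, pvPatToList]

theorem good_five : ∀ tok ∈ (["\"value\"", "\"field\"", "\"element\"", "\"text\"", "\"item\""] : List String), pvGood tok := by
  intro tok h
  fin_cases h <;> exact ⟨by decide, by decide, by decide, by decide⟩

theorem good_braced : ∀ tok ∈ (["\"{url}\"", "\"{value}\"", "\"{field}\"", "\"{element}\"", "\"{item}\"", "\"{text}\""] : List String), pvGood tok := by
  intro tok h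
  fin_cases h <;> exact ⟨by decide, by decide, by decide, by decide⟩

-- B's factored second condition equals A's flat one
theorem rule2_eq (a b c d e : Bool) :
    ((a && b && (c || d)) || (a && e)) = (a && ((b && (c || d)) || e)) := by
  cases a <;> simp

-- one-token and two-token instances of the central lemma, on strings
theorem one_tok (step tok : String) (g : pvGood tok) :
    pyReplace1 step "{}" tok = String.ofList (substPass step.toList [tok]) := by
  rw [← foldl_chReplace1_eq_substPass step.toList [tok] (by simpa using g)]
  simp only [List.foldl_cons, List.foldl_nil]
  rw [pyReplace1, pvPatToList]

theorem two_tok (step tok1 tok2 : String) (g1 : pvGood tok1) (g2 : pvGood tok2) :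
    pyReplace1 (pyReplace1 step "{}" tok1) "{}" tok2 =
      String.ofList (substPass step.toList [tok1, tok2]) := by
  rw [← foldl_chReplace1_eq_substPass step.toList [tok1, tok2] (by
    intro t ht
    rcases List.mem_cons.mp ht with h | h
    · exact h ▸ g1
    · exact (List.mem_singleton.mp h) ▸ g2)]
  simp only [List.foldl_cons, List.foldl_nil]
  rw [pyReplace1, pyReplace1, pvPatToList]
  congr 2
  rw [String.toList_ofList]

-- ===== VERDICT (by name: the statement is the Claim_ definition above) =====
set_option maxHeartbeats 2000000 in
theorem canonicalize_params_py_spec : Claim_equal_canonicalize_params_py := by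
  intro step _
  unfold Spec_canonicalize_params_py canonicalize_params_py canonicalize_params_py_alt paramsFor
  set low := PySem.Str.lower step with hlow
  by_cases h0 : PySem.Str.isIn "{}" step
  case neg =>
    simp only [Bool.not_eq_true] at h0
    simp only [h0, Bool.not_false, if_true]
    rw [substPass_noocc step.toList _ (by
      intro hinf
      have ht : PySem.Str.isIn "{}" step = true :=
        (PySem.Str.isIn_iff_infix "{}" step).mpr (by rwa [pvPatToList])
      rw [ht] at h0
      cases h0)]
    exact (String.ofList_toList).symm
  case pos =>
    simp only [h0, Bool.not_true, Bool.false_eq_true, if_false]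
    simp only [rule2_eq]
    by_cases h1 : PySem.Str.isIn "navigates to" low = true
    case pos =>
      rw [if_pos h1, if_pos h1]
      exact one_tok step _ (good_braced _ (by simp))
    case neg =>
    rw [if_neg h1, if_neg h1]
    by_cases h2 : (PySem.Str.isIn "enters" low &&
        ((PySem.Str.isIn "into" low && (PySem.Str.isIn "field" low || PySem.Str.isIn "input" low)) ||
          PySem.Str.isIn "input with label" low)) = true
    case pos =>
      rw [if_pos h2, if_pos h2]
      exact two_tok step _ _ (good_braced _ (by simp)) (good_braced _ (by simp))
    case neg =>
    rw [if_neg h2, if_neg h2]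
    by_cases h34 : (PySem.Str.isIn "clicks the" low && PySem.Str.isIn "button" low) = true
    case pos =>
      by_cases hitem : PySem.Str.isIn "for the item" low = true
      case pos =>
        rw [if_pos (show (PySem.Str.isIn "clicks the" low && PySem.Str.isIn "button" low &&
              PySem.Str.isIn "for the item" low) = true from by rw [h34, hitem]; rfl),
            if_pos h34, if_pos hitem]
        exact two_tok step _ _ (good_braced _ (by simp)) (good_braced _ (by simp))
      case neg =>
        have hitem' : PySem.Str.isIn "for the item" low = false := by
          rwa [Bool.not_eq_true] at hitem
        rw [if_neg (show ¬ ((PySem.Str.isIn "clicks the" low && PySem.Str.isIn "button" low &&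
              PySem.Str.isIn "for the item" low) = true) from by rw [h34, hitem']; simp),
            if_pos h34, if_pos h34, if_neg hitem]
        exact one_tok step _ (good_braced _ (by simp))
    case neg =>
    have h34' : (PySem.Str.isIn "clicks the" low && PySem.Str.isIn "button" low) = false := by
      rwa [Bool.not_eq_true] at h34
    rw [if_neg (show ¬ ((PySem.Str.isIn "clicks the" low && PySem.Str.isIn "button" low &&
          PySem.Str.isIn "for the item" low) = true) from by rw [h34']; simp),
        if_neg h34, if_neg h34]
    by_cases h5 : PySem.Str.isIn "should see text" low = true
    case pos =>
      rw [if_pos h5, if_pos h5]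
      exact one_tok step _ (good_braced _ (by simp))
    case neg =>
    rw [if_neg h5, if_neg h5]
    by_cases h6 : PySem.Str.isIn "should be on the home page" low = true
    case pos =>
      rw [if_pos h6, if_pos (show (PySem.Str.isIn "should be on the home page" low ||
            PySem.Str.isIn "action should" low) = true from by rw [h6]; simp)]
      rw [substPass_nilTok]
      exact (String.ofList_toList).symm
    case neg =>
    rw [if_neg h6]
    by_cases h7 : PySem.Str.isIn "action should" low = true
    case pos =>
      rw [if_pos h7, if_pos (show (PySem.Str.isIn "should be on the home page" low ||
            PySem.Str.isIn "action should" low) = true from by rw [h7]; simp)]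
      rw [substPass_nilTok]
      exact (String.ofList_toList).symm
    case neg =>
    have h6' : PySem.Str.isIn "should be on the home page" low = false := by
      rwa [Bool.not_eq_true] at h6
    have h7' : PySem.Str.isIn "action should" low = false := by
      rwa [Bool.not_eq_true] at h7
    rw [if_neg (show ¬ ((PySem.Str.isIn "should be on the home page" low ||
          PySem.Str.isIn "action should" low) = true) from by rw [h6', h7']; simp),
        if_neg h7]
    by_cases hc : PySem.Str.count step "{}" = 1
    case pos =>
      rw [if_pos hc, if_pos hc]
      have hc' : cntPat step.toList = 1 := by
        rw [← count_eq_cntPat]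
        have := hc
        rw [PySem.Str.count_eq, pvPatToList] at this
        exact this
      have hrep : PySem.Str.replace step "{}" "\"{value}\"" =
          String.ofList (PySem.Chars.replace step.toList ['{', '}'] ("\"{value}\"" : String).toList) := by
        rw [← String.ofList_toList (s := PySem.Str.replace step "{}" "\"{value}\"")]
        rw [PySem.Str.toList_replace, pvPatToList]
      rw [hrep, replace_eq_repAllPat, repAllPat_cnt1 _ _ hc']
      rw [← foldl_chReplace1_eq_substPass step.toList ["\"{value}\""]
        (by simpa using good_braced "\"{value}\"" (by simp))]
      rfl
    case neg =>
      rw [if_neg hc, if_neg hc]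
      rw [← String.ofList_toList (s := (PySem.List.pyRange 0 ((PySem.Str.count step "{}" : Nat) : Int) 1).foldl _ step)]
      congr 1
      have hfold :
          ((PySem.List.pyRange 0 ((PySem.Str.count step "{}" : Nat) : Int) 1).foldl
            (fun result i =>
              let param_name :=
                if i < 5 then
                  (PySem.List.pyGet? ["value", "field", "element", "text", "item"] i).getD ""
                else "value" ++ PySem.Int.toStr (i + 1)
              pyReplace1 result "{}" ("\"" ++ param_name ++ "\"")) step) =
          ((PySem.List.pyRange 0 ((PySem.Str.count step "{}" : Nat) : Int) 1).foldl
            (fun r i => pyReplace1 r "{}" (tokA i)) step) := by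
        rfl
      rw [hfold, toList_foldl_pyReplace1,
          ← List.foldl_map (f := tokA)
            (g := fun r tok => chReplace1 r ['{', '}'] tok.toList),
          map_tokA_range]
      rw [foldl_chReplace1_eq_substPass _ _ (by
        intro tok htok
        rcases List.mem_append.mp htok with h | h
        · exact good_five tok (List.mem_of_mem_take h)
        · obtain ⟨i, _, rfl⟩ := List.mem_map.mp h
          exact good_gen i)]
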